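-- pv_equiv track=rewrite | github.com/lucasXiaofan/cs520_exercise2 | exercise1_multi_solution_variants/problem_6.py | containsCycle_deepseek_self_planning
-- ===== SOURCE A (Python) =====
-- from typing import List
--
-- def containsCycle_deepseek_self_planning(grid: List[List[str]]) -> bool:
--     if not grid or not grid[0]:
--         return False
--
--     rows, cols = len(grid), len(grid[0])
--     visited = [[False for _ in range(cols)] for _ in range(rows)]
--
--     def dfs(r, c, pr, pc, char):
--         if visited[r][c]:
--             return True
--         visited[r][c] = True
--
--         directions = [(-1, 0), (1, 0), (0, -1), (0, 1)]
--         for dr, dc in directions: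
--             nr, nc = r + dr, c + dc
--             if 0 <= nr < rows and 0 <= nc < cols and grid[nr][nc] == char and not (nr == pr and nc == pc):
--                 if dfs(nr, nc, r, c, char):
--                     return True
--         return False
--
--     for i in range(rows):
--         for j in range(cols):
--             if not visited[i][j]:
--                 if dfs(i, j, -1, -1, grid[i][j]):
--                     return True
--     return False
-- ===== SOURCE B (Python) =====
-- from typing import List
--
-- def containsCycle_deepseek_self_planning(grid: List[List[str]]) -> bool:
--     if not grid or not grid[0]:
--         return False
--     rows, cols = len(grid), len(grid[0])
--     visited = set()
--     for i in range(rows):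
--         for j in range(cols):
--             if (i, j) in visited:
--                 continue
--             ch = grid[i][j]
--             stack = [(i, j, -1, -1)]
--             while stack:
--                 r, c, pr, pc = stack.pop()
--                 if (r, c) in visited:
--                     return True
--                 visited.add((r, c))
--                 for dr, dc in ((0, 1), (0, -1), (1, 0), (-1, 0)):
--                     nr, nc = r + dr, c + dc
--                     if 0 <= nr < rows and 0 <= nc < cols and grid[nr][nc] == ch and (nr, nc) != (pr, pc):
--                         stack.append((nr, nc, r, c))
--     return False
-- ===== Notes on version B (the rewrite author's own statement) =====
-- stated objective: alternative
-- what changed: Replaces A's recursive DFS (recursion per cell, bool-matrix visited) by an iterative explicit-stack DFS over (cell, parent) frames with a visited set, pushing guarded neighbours in reversed order; no Python recursion-depth dependence.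
-- outside the precondition, e.g. on containsCycle_deepseek_self_planning([['a', 'a'], ['a', 'a'], ['b']]): A returns True, B raises IndexError
import Mathlib
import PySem

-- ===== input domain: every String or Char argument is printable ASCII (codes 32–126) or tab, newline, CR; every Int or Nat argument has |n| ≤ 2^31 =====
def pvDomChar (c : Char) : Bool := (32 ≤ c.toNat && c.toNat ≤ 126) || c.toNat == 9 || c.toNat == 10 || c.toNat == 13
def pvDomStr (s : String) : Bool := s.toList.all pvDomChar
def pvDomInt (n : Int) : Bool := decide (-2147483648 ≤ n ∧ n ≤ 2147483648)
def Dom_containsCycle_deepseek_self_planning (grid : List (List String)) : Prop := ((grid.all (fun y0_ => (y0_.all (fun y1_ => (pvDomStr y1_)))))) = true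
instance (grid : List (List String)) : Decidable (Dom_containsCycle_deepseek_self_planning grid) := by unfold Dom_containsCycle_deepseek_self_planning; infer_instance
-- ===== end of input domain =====

-- B replaces A's recursive DFS by an explicit-stack DFS (same traversal order via reversed
-- pushes): an alternative decomposition that does not hit Python's recursion limit.

-- helpers shared by both ports (both Pythons compute these identical values):
-- grid[r][c] (always accessed in range inside Pre_, so the default is never the value used)
def pvCell (grid : List (List String)) (r c : Int) : String :=
  (PySem.List.pyGet? ((PySem.List.pyGet? grid r).getD []) c).getD ""

-- the neighbour guard '0 <= nr < rows and 0 <= nc < cols and grid[nr][nc] == char and not parent'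
def pvGuard (grid : List (List String)) (rows cols : Int) (ch : String)
    (r c pr pc : Int) (d : Int × Int) : Option (Int × Int × Int × Int) :=
  let nr := r + d.1
  let nc := c + d.2
  if 0 ≤ nr ∧ nr < rows ∧ 0 ≤ nc ∧ nc < cols ∧ pvCell grid nr nc = ch ∧ ¬(nr = pr ∧ nc = pc)
  then some (nr, nc, r, c) else none

-- nested 'for i in range(rows): for j in range(cols)' as one cell list
def pvCells (rows cols : Int) : List (Int × Int) :=
  (PySem.List.pyRange 0 rows 1).flatMap (fun i => (PySem.List.pyRange 0 cols 1).map (fun j => (i, j)))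

-- number of in-rectangle cells not yet visited (termination measure for port B)
def pvUnv (rows cols : Int) (v : Finset (Nat × Nat)) : Nat :=
  ((Finset.range rows.toNat ×ˢ Finset.range cols.toNat).filter (fun p => p ∉ v)).card

-- ===== PORT A =====
-- A's directions [(-1,0),(1,0),(0,-1),(0,1)]
def pvDirsA : List (Int × Int) := [(-1, 0), (1, 0), (0, -1), (0, 1)]

def pvNbrsA (grid : List (List String)) (rows cols : Int) (ch : String)
    (r c pr pc : Int) : List (Int × Int × Int × Int) :=
  pvDirsA.filterMap (pvGuard grid rows cols ch r c pr pc)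

-- A's dfs, with fuel as a totality device (fuel rows*cols+1 always suffices: each recursion
-- level marks a fresh cell) and an in-range guard that is a no-op on A's actual calls.
mutual
def pvDfsA (grid : List (List String)) (rows cols : Int) (ch : String) :
    Nat → Finset (Nat × Nat) → (Int × Int × Int × Int) → Bool × Finset (Nat × Nat)
  | 0, v, _ => (false, v)
  | m + 1, v, (r, c, pr, pc) =>
    if 0 ≤ r ∧ r < rows ∧ 0 ≤ c ∧ c < cols then
      if (r.toNat, c.toNat) ∈ v then (true, v)      -- 'if visited[r][c]: return True'
      else                                           -- 'visited[r][c] = True' then the direction loop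
        pvDfsAList grid rows cols ch m (insert (r.toNat, c.toNat) v)
          (pvNbrsA grid rows cols ch r c pr pc)
    else (false, v)
termination_by m _ _ => (m, 0)
decreasing_by exact Prod.Lex.left _ _ (Nat.lt_succ_self m)

-- 'for dr, dc in directions: … if dfs(...): return True' over the guarded neighbour list
def pvDfsAList (grid : List (List String)) (rows cols : Int) (ch : String) :
    Nat → Finset (Nat × Nat) → List (Int × Int × Int × Int) → Bool × Finset (Nat × Nat)
  | _, v, [] => (false, v)
  | m, v, f :: fs =>
    match pvDfsA grid rows cols ch m v f with
    | (true, v') => (true, v')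
    | (false, v') => pvDfsAList grid rows cols ch m v' fs
termination_by m _ fs => (m, fs.length + 1)
decreasing_by
  · exact Prod.Lex.right _ (by simp)
  · exact Prod.Lex.right _ (by simp)
end

-- 'for i … for j …: if not visited[i][j]: if dfs(i, j, -1, -1, grid[i][j]): return True'
def pvLoopA (grid : List (List String)) (rows cols : Int) :
    Finset (Nat × Nat) → List (Int × Int) → Bool
  | _, [] => false
  | v, (i, j) :: rest =>
    if (i.toNat, j.toNat) ∈ v then pvLoopA grid rows cols v rest
    else
      match pvDfsA grid rows cols (pvCell grid i j) (rows.toNat * cols.toNat + 1) v (i, j, -1, -1) with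
      | (true, _) => true
      | (false, v') => pvLoopA grid rows cols v' rest

def containsCycle_deepseek_self_planning (grid : List (List String)) : Bool :=
  if grid = [] ∨ grid.headD [] = [] then false
  else
    pvLoopA grid (grid.length : Int) ((grid.headD []).length : Int) ∅
      (pvCells (grid.length : Int) ((grid.headD []).length : Int))

-- ===== PORT B =====
-- B's directions ((0,1),(0,-1),(1,0),(-1,0)) — reversed, so pops come in A's order
def pvDirsB : List (Int × Int) := [(0, 1), (0, -1), (1, 0), (-1, 0)]

def pvNbrsB (grid : List (List String)) (rows cols : Int) (ch : String)
    (r c pr pc : Int) : List (Int × Int × Int × Int) :=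
  pvDirsB.filterMap (pvGuard grid rows cols ch r c pr pc)

-- 'stack.append' for each guarded neighbour; head of the list is the top of the stack
def pvPush (l st : List (Int × Int × Int × Int)) : List (Int × Int × Int × Int) :=
  l.foldl (fun s f => f :: s) st

-- lemma the port needs for termination (cited in decreasing_by)
theorem pvUnv_insert_lt (rows cols : Int) (v : Finset (Nat × Nat)) (r c : Int)
    (h : 0 ≤ r ∧ r < rows ∧ 0 ≤ c ∧ c < cols) (hv : (r.toNat, c.toNat) ∉ v) :
    pvUnv rows cols (insert (r.toNat, c.toNat) v) < pvUnv rows cols v := by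
  unfold pvUnv
  have hset : ((Finset.range rows.toNat ×ˢ Finset.range cols.toNat).filter
      (fun p => p ∉ insert (r.toNat, c.toNat) v)) =
      ((Finset.range rows.toNat ×ˢ Finset.range cols.toNat).filter
      (fun p => p ∉ v)).erase (r.toNat, c.toNat) := by
    ext p
    simp only [Finset.mem_filter, Finset.mem_erase, Finset.mem_insert]
    tauto
  rw [hset]
  apply Finset.card_erase_lt_of_mem
  simp only [Finset.mem_filter, Finset.mem_product, Finset.mem_range]
  exact ⟨⟨by omega, by omega⟩, hv⟩

-- B's 'while stack' loop: pop, cycle-check, mark, push guarded neighbours.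
-- The out-of-range branch is a totality guard only: every frame B ever pushes is in range.
def pvRunB (grid : List (List String)) (rows cols : Int) (ch : String)
    (v : Finset (Nat × Nat)) (st : List (Int × Int × Int × Int)) : Bool × Finset (Nat × Nat) :=
  match st with
  | [] => (false, v)
  | (r, c, pr, pc) :: rest =>
    if h : 0 ≤ r ∧ r < rows ∧ 0 ≤ c ∧ c < cols then
      if hv : (r.toNat, c.toNat) ∈ v then (true, v)   -- 'if (r, c) in visited: return True'
      else
        pvRunB grid rows cols ch (insert (r.toNat, c.toNat) v)
          (pvPush (pvNbrsB grid rows cols ch r c pr pc) rest)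
    else pvRunB grid rows cols ch v rest
termination_by (pvUnv rows cols v, st.length)
decreasing_by
  · exact Prod.Lex.left _ _ (pvUnv_insert_lt rows cols v r c h hv)
  · exact Prod.Lex.right _ (by simp)

def pvLoopB (grid : List (List String)) (rows cols : Int) :
    Finset (Nat × Nat) → List (Int × Int) → Bool
  | _, [] => false
  | v, (i, j) :: rest =>
    if (i.toNat, j.toNat) ∈ v then pvLoopB grid rows cols v rest
    else
      match pvRunB grid rows cols (pvCell grid i j) v [(i, j, -1, -1)] with
      | (true, _) => true
      | (false, v') => pvLoopB grid rows cols v' rest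

def containsCycle_deepseek_self_planning_alt (grid : List (List String)) : Bool :=
  if grid = [] ∨ grid.headD [] = [] then false
  else
    pvLoopB grid (grid.length : Int) ((grid.headD []).length : Int) ∅
      (pvCells (grid.length : Int) ((grid.headD []).length : Int))

-- ===== PRECONDITION & SPEC =====
-- Pre_ excludes ragged grids with a row shorter than the first row: A's grid[nr][nc] /
-- grid[i][j] accesses then generally raise IndexError (A can still return True when a cycle
-- is found before any missing cell is touched — such inputs are excluded and cited).
def Pre_containsCycle_deepseek_self_planning (grid : List (List String)) : Prop :=
  ∀ row ∈ grid, (grid.headD []).length ≤ row.length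
instance (grid : List (List String)) : Decidable (Pre_containsCycle_deepseek_self_planning grid) := by
  unfold Pre_containsCycle_deepseek_self_planning; infer_instance

def pvWitness_containsCycle_deepseek_self_planning : List (List String) := [["a", "b"], ["b", "b"]]

def Spec_containsCycle_deepseek_self_planning (grid : List (List String)) (out : Bool) : Prop := out = containsCycle_deepseek_self_planning_alt grid
instance (grid : List (List String)) (out : Bool) : Decidable (Spec_containsCycle_deepseek_self_planning grid out) := by unfold Spec_containsCycle_deepseek_self_planning; infer_instance

-- ===== CLAIM (what is proved, stated in full; the proofs are below) =====
def Claim_equal_containsCycle_deepseek_self_planning : Prop := ∀ (grid : List (List String)), Dom_containsCycle_deepseek_self_planning grid → Pre_containsCycle_deepseek_self_planning grid → Spec_containsCycle_deepseek_self_planning grid (containsCycle_deepseek_self_planning grid)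

-- ===== LEMMAS AND PROOFS =====

theorem pvPush_eq (l st : List (Int × Int × Int × Int)) : pvPush l st = l.reverse ++ st := by
  induction l generalizing st with
  | nil => rfl
  | cons a l ih =>
    show pvPush l (a :: st) = (a :: l).reverse ++ st
    rw [ih]; simp

theorem pvNbrsB_eq (grid : List (List String)) (rows cols : Int) (ch : String) (r c pr pc : Int) :
    pvNbrsB grid rows cols ch r c pr pc = (pvNbrsA grid rows cols ch r c pr pc).reverse := by
  unfold pvNbrsA pvNbrsB pvDirsA pvDirsB
  cases h1 : pvGuard grid rows cols ch r c pr pc (-1, 0) <;>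
  cases h2 : pvGuard grid rows cols ch r c pr pc (1, 0) <;>
  cases h3 : pvGuard grid rows cols ch r c pr pc (0, -1) <;>
  cases h4 : pvGuard grid rows cols ch r c pr pc (0, 1) <;>
  simp [List.filterMap, h1, h2, h3, h4]

theorem pvUnv_mono (rows cols : Int) {v w : Finset (Nat × Nat)} (h : v ⊆ w) :
    pvUnv rows cols w ≤ pvUnv rows cols v := by
  apply Finset.card_le_card
  intro p hp
  simp only [Finset.mem_filter] at hp ⊢
  exact ⟨hp.1, fun hv => hp.2 (h hv)⟩

theorem pvUnv_le (rows cols : Int) (v : Finset (Nat × Nat)) :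
    pvUnv rows cols v ≤ rows.toNat * cols.toNat := by
  calc pvUnv rows cols v ≤ (Finset.range rows.toNat ×ˢ Finset.range cols.toNat).card :=
        Finset.card_filter_le _ _
    _ = rows.toNat * cols.toNat := by rw [Finset.card_product, Finset.card_range, Finset.card_range]

theorem pvDfsAList_mono_of (grid : List (List String)) (rows cols : Int) (ch : String)
    (m : Nat) (hstep : ∀ v f, v ⊆ (pvDfsA grid rows cols ch m v f).2) :
    ∀ v fs, v ⊆ (pvDfsAList grid rows cols ch m v fs).2 := by
  intro v fs
  induction fs generalizing v with
  | nil => simp [pvDfsAList]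
  | cons f fs ih =>
    simp only [pvDfsAList]
    cases hd : pvDfsA grid rows cols ch m v f with
    | mk b v' =>
      have hv' : v ⊆ v' := by have := hstep v f; rw [hd] at this; exact this
      cases b
      · exact subset_trans hv' (ih v')
      · exact hv'

theorem pvDfsA_mono (grid : List (List String)) (rows cols : Int) (ch : String) :
    ∀ m : Nat, ∀ v f, v ⊆ (pvDfsA grid rows cols ch m v f).2 := by
  intro m
  induction m with
  | zero => intro v f; simp [pvDfsA]
  | succ m ih =>
    intro v f
    obtain ⟨r, c, pr, pc⟩ := f
    simp only [pvDfsA]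
    split
    · split
      · simp
      · exact subset_trans (Finset.subset_insert _ _) (pvDfsAList_mono_of grid rows cols ch m ih _ _)
    · simp

theorem pvNbrsA_len (grid : List (List String)) (rows cols : Int) (ch : String) (r c pr pc : Int) :
    (pvNbrsA grid rows cols ch r c pr pc).length ≤ 4 := by
  have := List.length_filterMap_le (pvGuard grid rows cols ch r c pr pc) pvDirsA
  simpa [pvDirsA] using this

-- the simulation: draining B's stack 'fs ++ rest' is A's sequential dfs over fs, then the rest
theorem pvSim (grid : List (List String)) (rows cols : Int) (ch : String) :
    ∀ k : Nat, ∀ (v : Finset (Nat × Nat)) (fs rest : List (Int × Int × Int × Int)) (m : Nat),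
      5 * pvUnv rows cols v + fs.length < k → pvUnv rows cols v < m →
      pvRunB grid rows cols ch v (fs ++ rest) =
        (match pvDfsAList grid rows cols ch m v fs with
         | (true, v') => (true, v')
         | (false, v') => pvRunB grid rows cols ch v' rest) := by
  intro k
  induction k with
  | zero => intro v fs rest m hk hm; omega
  | succ k ih =>
    intro v fs rest m hk hm
    cases fs with
    | nil => simp [pvDfsAList]
    | cons f fs' =>
      obtain ⟨r, c, pr, pc⟩ := f
      cases m with
      | zero => omega
      | succ m' =>
        rw [List.cons_append, pvRunB]
        by_cases h : 0 ≤ r ∧ r < rows ∧ 0 ≤ c ∧ c < cols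
        · by_cases hv : (r.toNat, c.toNat) ∈ v
          · simp only [pvDfsAList, pvDfsA, dif_pos h, dif_pos hv, if_pos h, if_pos hv]
          · have hlt := pvUnv_insert_lt rows cols v r c h hv
            simp only [dif_pos h, dif_neg hv]
            rw [pvPush_eq, pvNbrsB_eq, List.reverse_reverse]
            rw [ih (insert (r.toNat, c.toNat) v) (pvNbrsA grid rows cols ch r c pr pc)
                (fs' ++ rest) m'
                (by have := pvNbrsA_len grid rows cols ch r c pr pc; simp at hk ⊢; omega)
                (by omega)]
            have hdfs : pvDfsA grid rows cols ch (m' + 1) v (r, c, pr, pc) =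
                pvDfsAList grid rows cols ch m' (insert (r.toNat, c.toNat) v)
                  (pvNbrsA grid rows cols ch r c pr pc) := by
              simp only [pvDfsA, if_pos h, if_neg hv]
            cases hres : pvDfsAList grid rows cols ch m' (insert (r.toNat, c.toNat) v)
                (pvNbrsA grid rows cols ch r c pr pc) with
            | mk b v₂ =>
              have hsub : insert (r.toNat, c.toNat) v ⊆ v₂ := by
                have := pvDfsAList_mono_of grid rows cols ch m'
                  (pvDfsA_mono grid rows cols ch m') (insert (r.toNat, c.toNat) v)
                  (pvNbrsA grid rows cols ch r c pr pc)
                rw [hres] at this; exact this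
              have hu2 : pvUnv rows cols v₂ ≤ pvUnv rows cols (insert (r.toNat, c.toNat) v) :=
                pvUnv_mono rows cols hsub
              cases b with
              | true =>
                simp only [pvDfsAList, hdfs, hres]
              | false =>
                simp only [pvDfsAList, hdfs, hres]
                rw [ih v₂ fs' rest (m' + 1) (by simp at hk; omega) (by omega)]
        · simp only [dif_neg h]
          have hdfs : pvDfsA grid rows cols ch (m' + 1) v (r, c, pr, pc) = (false, v) := by
            simp only [pvDfsA, if_neg h]
          simp only [pvDfsAList, hdfs]
          exact ih v fs' rest (m' + 1) (by simp at hk; omega) hm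

theorem pvRunB_single (grid : List (List String)) (rows cols : Int) (ch : String)
    (v : Finset (Nat × Nat)) (f : Int × Int × Int × Int) (m : Nat)
    (hm : pvUnv rows cols v < m) :
    pvRunB grid rows cols ch v [f] = pvDfsA grid rows cols ch m v f := by
  have hs := pvSim grid rows cols ch (5 * pvUnv rows cols v + 2) v [f] [] m (by simp) hm
  simp only [List.append_nil] at hs
  rw [hs]
  cases hd : pvDfsA grid rows cols ch m v f with
  | mk b v' =>
    cases b <;> simp only [pvDfsAList, hd] <;> rw [pvRunB]

theorem pvLoop_eq (grid : List (List String)) (rows cols : Int) :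
    ∀ (cells : List (Int × Int)) (v : Finset (Nat × Nat)),
      pvLoopA grid rows cols v cells = pvLoopB grid rows cols v cells := by
  intro cells
  induction cells with
  | nil => intro v; simp [pvLoopA, pvLoopB]
  | cons ij rest ih =>
    intro v
    obtain ⟨i, j⟩ := ij
    simp only [pvLoopA, pvLoopB]
    by_cases hm : (i.toNat, j.toNat) ∈ v
    · simp only [if_pos hm]; exact ih v
    · simp only [if_neg hm]
      rw [← pvRunB_single grid rows cols (pvCell grid i j) v (i, j, -1, -1)
          (rows.toNat * cols.toNat + 1) (by have := pvUnv_le rows cols v; omega)]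
      cases hd : pvRunB grid rows cols (pvCell grid i j) v [(i, j, -1, -1)] with
      | mk b v' =>
        cases b
        · exact ih v'
        · rfl

theorem pvMain (grid : List (List String)) :
    containsCycle_deepseek_self_planning grid = containsCycle_deepseek_self_planning_alt grid := by
  unfold containsCycle_deepseek_self_planning containsCycle_deepseek_self_planning_alt
  split
  · rfl
  · exact pvLoop_eq grid _ _ _ _

-- ===== VERDICT (by name: the statement is the Claim_ definition above) =====
theorem containsCycle_deepseek_self_planning_spec : Claim_equal_containsCycle_deepseek_self_planning := by
  intro grid _ _
  unfold Spec_containsCycle_deepseek_self_planning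
  exact pvMain grid
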